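-- pv_equiv track=rewrite | github.com/Dennis-coder/AoC2022 | day15/solution.py | part1
-- ===== SOURCE A (Python) =====
-- def manhattan(p, q):
--     return abs(p[0] - q[0]) + abs(p[1] - q[1])
--
-- def merge_intervals(intervals):
--     sorted_intervals = sorted(intervals, key=lambda x: x[0])
--     merged_intervals = [sorted_intervals[0]]
--     for i in sorted_intervals[1:]:
--         if merged_intervals[-1][0] <= i[0] <= merged_intervals[-1][-1]:
--             merged_intervals[-1][-1] = max(merged_intervals[-1][-1], i[-1])
--         else:
--             merged_intervals.append(i)
--     return merged_intervals
--
-- def part1(data):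
--     intervals = []
--     y = 2000000
--     for sensor, closest_beacon in data:
--         max_distance = manhattan(sensor, closest_beacon)
--         distance_to_y = abs(y - sensor[1])
--         if distance_to_y > max_distance:
--             continue
--         steps = max_distance - distance_to_y
--         intervals.append([sensor[0] - steps, sensor[0] + steps])
--
--     cannot_contain = sum([x2 - x1 + 1 for x1, x2 in merge_intervals(intervals)])
--     sensors_on_y = sum([1 for sensor in set([sensor for sensor, _ in data]) if sensor[1] == y])
--     beacons_on_y = sum([1 for beacon in set([beacon for _, beacon in data]) if beacon[1] == y])
--
--     return cannot_contain - sensors_on_y - beacons_on_y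
-- ===== SOURCE B (Python) =====
-- def part1(data):
--     y = 2000000
--     events = []
--     for sensor, beacon in data:
--         r = abs(sensor[0] - beacon[0]) + abs(sensor[1] - beacon[1]) - abs(y - sensor[1])
--         if r >= 0:
--             events.append((sensor[0] - r, 1))
--             events.append((sensor[0] + r + 1, -1))
--     events.sort(key=lambda e: e[0])
--     covered = 0
--     depth = 0
--     prev = events[0][0]
--     for x, d in events:
--         if depth > 0:
--             covered += x - prev
--         depth += d
--         prev = x
--     sensors_on_y = len({sensor for sensor, _ in data if sensor[1] == y})
--     beacons_on_y = len({beacon for _, beacon in data if beacon[1] == y})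
--     return covered - sensors_on_y - beacons_on_y
-- ===== Notes on version B (the rewrite author's own statement) =====
-- stated objective: alternative
-- what changed: Replaced merge_intervals (sort intervals, build a merged-interval list, sum x2-x1+1) by a sweep line over +1/-1 boundary events that accumulates the union length with a running coverage depth, never materialising merged intervals.
import Mathlib
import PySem

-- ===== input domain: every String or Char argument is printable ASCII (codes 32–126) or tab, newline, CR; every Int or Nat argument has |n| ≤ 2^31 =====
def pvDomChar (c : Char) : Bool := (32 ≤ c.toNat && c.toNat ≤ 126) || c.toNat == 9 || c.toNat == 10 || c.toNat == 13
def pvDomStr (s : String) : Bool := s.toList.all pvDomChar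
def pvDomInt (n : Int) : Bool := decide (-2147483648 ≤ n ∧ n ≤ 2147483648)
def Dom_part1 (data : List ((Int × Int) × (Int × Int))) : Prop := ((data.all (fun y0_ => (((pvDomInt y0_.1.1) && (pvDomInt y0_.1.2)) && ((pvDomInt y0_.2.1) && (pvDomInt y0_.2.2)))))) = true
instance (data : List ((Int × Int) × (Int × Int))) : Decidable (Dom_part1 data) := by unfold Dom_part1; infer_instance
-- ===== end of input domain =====

-- B replaces A's merge_intervals + length sum by a boundary-event sweep line (alternative
-- algorithm, same O(n log n) cost); both raise IndexError when no sensor's range reaches the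
-- row (A on sorted_intervals[0], B on events[0]) — those inputs are outside Pre_part1.

-- ===== PORT A =====
def pvManhattan (p q : Int × Int) : Int := |p.1 - q.1| + |p.2 - q.2|

-- A's per-sensor loop body ('if distance_to_y > max_distance: continue' / append interval)
def pvStepA (intervals : List (Int × Int)) (p : (Int × Int) × (Int × Int)) : List (Int × Int) :=
  let max_distance := pvManhattan p.1 p.2
  let distance_to_y := |(2000000 : Int) - p.1.2|
  if distance_to_y > max_distance then intervals
  else
    let steps := max_distance - distance_to_y
    intervals ++ [(p.1.1 - steps, p.1.1 + steps)]

-- merge_intervals' loop body (merged_intervals[-1] access / in-place update of the last pair)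
def pvMergeStep (merged : List (Int × Int)) (i : Int × Int) : List (Int × Int) :=
  let last := merged.getLastD (0, 0)
  if last.1 ≤ i.1 ∧ i.1 ≤ last.2 then merged.dropLast ++ [(last.1, max last.2 i.2)]
  else merged ++ [i]

-- merge_intervals; none = IndexError on sorted_intervals[0] (empty input)
def pvMergeIntervals (intervals : List (Int × Int)) : Option (List (Int × Int)) :=
  match PySem.List.sorted intervals (fun x => x.1) false with
  | [] => none
  | first :: rest => some (rest.foldl pvMergeStep [first])

def part1 (data : List ((Int × Int) × (Int × Int))) : Int :=
  let intervals := data.foldl pvStepA []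
  match pvMergeIntervals intervals with
  | none => 0   -- IndexError: excluded by Pre_part1
  | some merged =>
    let cannot_contain := (merged.map (fun p => p.2 - p.1 + 1)).sum
    let sensors_on_y := ((PySem.Set.ofList (data.map (fun p => p.1))).filter (fun s => decide (s.2 = 2000000))).length
    let beacons_on_y := ((PySem.Set.ofList (data.map (fun p => p.2))).filter (fun b => decide (b.2 = 2000000))).length
    cannot_contain - (sensors_on_y : Int) - (beacons_on_y : Int)

-- ===== PORT B =====
-- B's per-sensor loop body: two boundary events (x1, +1) and (x2+1, -1)
def pvStepB (events : List (Int × Int)) (p : (Int × Int) × (Int × Int)) : List (Int × Int) :=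
  let r := |p.1.1 - p.2.1| + |p.1.2 - p.2.2| - |(2000000 : Int) - p.1.2|
  if 0 ≤ r then events ++ [(p.1.1 - r, 1), (p.1.1 + r + 1, -1)] else events

-- B's sweep loop body; state = (covered, depth, prev)
def pvSweepStep (s : Int × Int × Int) (e : Int × Int) : Int × Int × Int :=
  ((if 0 < s.2.1 then s.1 + (e.1 - s.2.2) else s.1), s.2.1 + e.2, e.1)

def part1_alt (data : List ((Int × Int) × (Int × Int))) : Int :=
  let events := PySem.List.sorted (data.foldl pvStepB []) (fun e => e.1) false
  match events with
  | [] => 0   -- IndexError on events[0]: excluded by Pre_part1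
  | e0 :: _ =>
  let st := events.foldl pvSweepStep (0, 0, e0.1)
  let sensors_on_y := (PySem.Set.ofList ((data.filter (fun p => decide (p.1.2 = 2000000))).map (fun p => p.1))).length
  let beacons_on_y := (PySem.Set.ofList ((data.filter (fun p => decide (p.2.2 = 2000000))).map (fun p => p.2))).length
  st.1 - (sensors_on_y : Int) - (beacons_on_y : Int)

-- ===== PRECONDITION & SPEC =====
-- Pre_ excludes exactly the inputs on which A raises IndexError (no sensor's range reaches row 2000000).
def Pre_part1 (data : List ((Int × Int) × (Int × Int))) : Prop :=
  ∃ p ∈ data, |(2000000 : Int) - p.1.2| ≤ |p.1.1 - p.2.1| + |p.1.2 - p.2.2|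
instance (data : List ((Int × Int) × (Int × Int))) : Decidable (Pre_part1 data) := by unfold Pre_part1; infer_instance

def pvWitness_part1 : (List ((Int × Int) × (Int × Int))) := [((0, 2000000), (2, 2000000))]

def Spec_part1 (data : List ((Int × Int) × (Int × Int))) (out : Int) : Prop := out = part1_alt data
instance (data : List ((Int × Int) × (Int × Int))) (out : Int) : Decidable (Spec_part1 data out) := by unfold Spec_part1; infer_instance

-- ===== CLAIM (what is proved, stated in full; the proofs are below) =====
def Claim_equal_part1 : Prop := ∀ (data : List ((Int × Int) × (Int × Int))), Dom_part1 data → Pre_part1 data → Spec_part1 data (part1 data)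

-- ===== LEMMAS AND PROOFS =====

-- the kept-sensor condition, the interval a kept sensor contributes, its two sweep events
def pvCond (p : (Int × Int) × (Int × Int)) : Bool :=
  decide (|(2000000 : Int) - p.1.2| ≤ |p.1.1 - p.2.1| + |p.1.2 - p.2.2|)
def pvIv (p : (Int × Int) × (Int × Int)) : Int × Int :=
  let s := |p.1.1 - p.2.1| + |p.1.2 - p.2.2| - |(2000000 : Int) - p.1.2|
  (p.1.1 - s, p.1.1 + s)
def pvEvts (q : Int × Int) : List (Int × Int) := [(q.1, 1), (q.2 + 1, -1)]
def pvI (data : List ((Int × Int) × (Int × Int))) : List (Int × Int) := (data.filter pvCond).map pvIv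
def pvE (data : List ((Int × Int) × (Int × Int))) : List (Int × Int) := (pvI data).flatMap pvEvts

noncomputable def pvU : List (Int × Int) → Finset Int
  | [] => ∅
  | q :: t => Finset.Icc q.1 q.2 ∪ pvU t

def pvDepthAt (E : List (Int × Int)) (x : Int) : Int := (E.map (fun e => if e.1 ≤ x then e.2 else 0)).sum

def pvLen (m : List (Int × Int)) : Int := (m.map (fun q => q.2 - q.1 + 1)).sum

lemma stepA_one (acc : List (Int × Int)) (p : (Int × Int) × (Int × Int)) :
    pvStepA acc p = acc ++ (if pvCond p then [pvIv p] else []) := by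
  simp only [pvStepA, pvCond, pvIv, pvManhattan]
  split_ifs with h1 h2 <;> simp_all
  omega

lemma stepA_eq (data : List ((Int × Int) × (Int × Int))) (acc : List (Int × Int)) :
    data.foldl pvStepA acc = acc ++ pvI data := by
  induction data generalizing acc with
  | nil => simp [pvI]
  | cons p t ih =>
    simp only [List.foldl_cons, ih, stepA_one, pvI, List.filter_cons]
    by_cases h : pvCond p <;> simp [h]

lemma stepB_one (acc : List (Int × Int)) (p : (Int × Int) × (Int × Int)) :
    pvStepB acc p = acc ++ (if pvCond p then pvEvts (pvIv p) else []) := by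
  simp only [pvStepB, pvCond, pvIv, pvEvts]
  split_ifs with h1 h2 <;> simp_all
  omega

lemma stepB_eq (data : List ((Int × Int) × (Int × Int))) (acc : List (Int × Int)) :
    data.foldl pvStepB acc = acc ++ pvE data := by
  induction data generalizing acc with
  | nil => simp [pvE, pvI]
  | cons p t ih =>
    simp only [List.foldl_cons, ih, stepB_one, pvE, pvI, List.filter_cons]
    by_cases h : pvCond p <;> simp [h]

lemma pvI_valid (data : List ((Int × Int) × (Int × Int))) : ∀ q ∈ pvI data, q.1 ≤ q.2 := by
  intro q hq
  simp only [pvI, List.mem_map, List.mem_filter] at hq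
  obtain ⟨p, ⟨_, hc⟩, rfl⟩ := hq
  simp only [pvCond, decide_eq_true_eq] at hc
  simp only [pvIv]
  omega

lemma mem_pvU (I : List (Int × Int)) (x : Int) : x ∈ pvU I ↔ ∃ q ∈ I, q.1 ≤ x ∧ x ≤ q.2 := by
  induction I with
  | nil => simp [pvU]
  | cons q t ih => simp [pvU, ih, Finset.mem_Icc]

lemma pvU_perm {l l' : List (Int × Int)} (h : l.Perm l') : pvU l = pvU l' := by
  apply Finset.ext
  intro x
  rw [mem_pvU, mem_pvU]
  constructor <;> rintro ⟨q, hq, hx⟩ <;> exact ⟨q, by first | exact h.mem_iff.mp hq | exact h.mem_iff.mpr hq, hx⟩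

lemma pvDepthAt_perm {l l' : List (Int × Int)} (h : l.Perm l') (x : Int) :
    pvDepthAt l x = pvDepthAt l' x := by
  exact List.Perm.sum_eq (h.map _)

lemma pvDepthAt_zero (E : List (Int × Int)) (x : Int) (h : ∀ e ∈ E, x < e.1) :
    pvDepthAt E x = 0 := by
  induction E with
  | nil => rfl
  | cons e t ih =>
    have h1 := h e (by simp)
    simp only [pvDepthAt, List.map_cons, List.sum_cons] at *
    rw [if_neg (by omega), ih (fun e he => h e (by simp [he]))]
    ring

lemma cover_iff (I : List (Int × Int)) (hv : ∀ q ∈ I, q.1 ≤ q.2) (x : Int) :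
    0 ≤ pvDepthAt (I.flatMap pvEvts) x ∧ (0 < pvDepthAt (I.flatMap pvEvts) x ↔ x ∈ pvU I) := by
  induction I with
  | nil => simp [pvDepthAt, pvU]
  | cons q t ih =>
    have hq := hv q (by simp)
    obtain ⟨ih1, ih2⟩ := ih (fun r hr => hv r (by simp [hr]))
    have hd : pvDepthAt ((q :: t).flatMap pvEvts) x
        = ((if q.1 ≤ x then (1:Int) else 0) + (if q.2 + 1 ≤ x then (-1:Int) else 0))
          + pvDepthAt (t.flatMap pvEvts) x := by
      simp only [pvDepthAt, pvEvts, List.flatMap_cons, List.map_append, List.sum_append,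
        List.map_cons, List.sum_cons, List.map_nil, List.sum_nil]
      ring
    rw [hd]
    constructor
    · split_ifs <;> omega
    · show _ ↔ x ∈ Finset.Icc q.1 q.2 ∪ pvU t
      rw [Finset.mem_union, Finset.mem_Icc, ← ih2]
      constructor
      · intro hpos
        by_cases hcov : q.1 ≤ x ∧ x ≤ q.2
        · exact Or.inl hcov
        · right; split_ifs at hpos <;> omega
      · rintro (hcov | hpos)
        · split_ifs <;> omega
        · split_ifs <;> omega

lemma snd_sum_flatMap (I : List (Int × Int)) : ((I.flatMap pvEvts).map (fun e => e.2)).sum = 0 := by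
  induction I with
  | nil => rfl
  | cons q t ih => simp [pvEvts, ih]

lemma le_foldr_max (E : List (Int × Int)) (a : Int) :
    a ≤ E.foldr (fun e m => max e.1 m) a ∧ ∀ e ∈ E, e.1 ≤ E.foldr (fun e m => max e.1 m) a := by
  induction E with
  | nil => simp
  | cons e t ih =>
    obtain ⟨ih1, ih2⟩ := ih
    refine ⟨by simp; omega, ?_⟩
    intro f hf
    rcases List.mem_cons.mp hf with rfl | hf
    · simp
    · have := ih2 f hf; simp; omega

lemma sweep_spec (E : List (Int × Int)) (acc depth prev hi : Int)
    (hs : E.Pairwise (fun a b => a.1 ≤ b.1)) (hlo : ∀ e ∈ E, prev ≤ e.1)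
    (hhi : ∀ e ∈ E, e.1 ≤ hi) (hph : prev ≤ hi)
    (hsum : depth + (E.map (fun e => e.2)).sum ≤ 0) :
    (E.foldl pvSweepStep (acc, depth, prev)).1
      = acc + (((Finset.Ico prev hi).filter (fun x => 0 < depth + pvDepthAt E x)).card : Int) := by
  induction E generalizing acc depth prev with
  | nil =>
    have hempty : (Finset.Ico prev hi).filter (fun x => 0 < depth + pvDepthAt [] x) = ∅ := by
      apply Finset.filter_eq_empty_iff.mpr
      intro x _
      simp only [pvDepthAt, List.map_nil, List.sum_nil] at *
      omega
    rw [List.foldl_nil, hempty]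
    simp
  | cons e t ih =>
    have he1 : prev ≤ e.1 := hlo e (by simp)
    have hehi : e.1 ≤ hi := hhi e (by simp)
    obtain ⟨hrel, hp⟩ := List.pairwise_cons.mp hs
    have hsum' : (depth + e.2) + (t.map (fun e => e.2)).sum ≤ 0 := by
      simp only [List.map_cons, List.sum_cons] at hsum; omega
    have hstep : pvSweepStep (acc, depth, prev) e
        = ((if 0 < depth then acc + (e.1 - prev) else acc), depth + e.2, e.1) := rfl
    rw [List.foldl_cons, hstep,
      ih _ _ _ hp hrel (fun f hf => hhi f (by simp [hf])) hehi hsum']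
    have hsplit : Finset.Ico prev hi = Finset.Ico prev e.1 ∪ Finset.Ico e.1 hi :=
      (Finset.Ico_union_Ico_eq_Ico he1 hehi).symm
    have hdisj : Disjoint ((Finset.Ico prev e.1).filter (fun x => 0 < depth + pvDepthAt (e :: t) x))
        ((Finset.Ico e.1 hi).filter (fun x => 0 < depth + pvDepthAt (e :: t) x)) :=
      (Finset.Ico_disjoint_Ico_consecutive prev e.1 hi).mono
        (Finset.filter_subset _ _) (Finset.filter_subset _ _)
    have hleft : (Finset.Ico prev e.1).filter (fun x => 0 < depth + pvDepthAt (e :: t) x)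
        = if 0 < depth then Finset.Ico prev e.1 else ∅ := by
      have hz : ∀ x ∈ Finset.Ico prev e.1, pvDepthAt (e :: t) x = 0 := by
        intro x hx
        rw [Finset.mem_Ico] at hx
        apply pvDepthAt_zero
        intro f hf
        rcases List.mem_cons.mp hf with rfl | hf
        · omega
        · have := hrel f hf; omega
      split_ifs with hd
      · apply Finset.filter_true_of_mem
        intro x hx; rw [hz x hx]; omega
      · apply Finset.filter_eq_empty_iff.mpr
        intro x hx; rw [hz x hx]; omega
    have hright : (Finset.Ico e.1 hi).filter (fun x => 0 < depth + pvDepthAt (e :: t) x)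
        = (Finset.Ico e.1 hi).filter (fun x => 0 < (depth + e.2) + pvDepthAt t x) := by
      apply Finset.filter_congr
      intro x hx
      rw [Finset.mem_Ico] at hx
      have : pvDepthAt (e :: t) x = e.2 + pvDepthAt t x := by
        simp only [pvDepthAt, List.map_cons, List.sum_cons]
        rw [if_pos hx.1]
      rw [this]
      omega
    rw [hsplit, Finset.filter_union, Finset.card_union_of_disjoint hdisj, hleft]
    have hcard : ((Finset.Ico prev e.1).card : Int) = e.1 - prev := by
      rw [Int.card_Ico, Int.toNat_of_nonneg (by omega)]
    rw [hright]
    have hemp : (((∅ : Finset Int)).card : Int) = 0 := by simp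
    split_ifs with hd <;> omega

lemma merge_spec (rest : List (Int × Int)) (front : List (Int × Int)) (cl cr : Int)
    (hv : ∀ q ∈ rest, q.1 ≤ q.2) (hcl : cl ≤ cr) (hge : ∀ q ∈ rest, cl ≤ q.1)
    (hs : rest.Pairwise (fun a b => a.1 ≤ b.1)) :
    pvLen (rest.foldl pvMergeStep (front ++ [(cl, cr)]))
      = pvLen front + ((Finset.Icc cl cr ∪ pvU rest).card : Int) := by
  induction rest generalizing front cl cr with
  | nil =>
    simp only [List.foldl_nil, pvU, Finset.union_empty, Int.card_Icc]
    simp only [pvLen, List.map_append, List.sum_append, List.map_cons, List.sum_cons,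
      List.map_nil, List.sum_nil]
    omega
  | cons i t ih =>
    obtain ⟨l, r⟩ := i
    have hcli : cl ≤ l := hge (l, r) (by simp)
    have hlr : l ≤ r := hv (l, r) (by simp)
    obtain ⟨hrel, hp⟩ := List.pairwise_cons.mp hs
    have hlastD : (front ++ [(cl, cr)]).getLastD (0, 0) = (cl, cr) := by
      simp
    have hdrop : (front ++ [(cl, cr)]).dropLast = front := by
      simp
    by_cases hc : l ≤ cr
    · have hstep : pvMergeStep (front ++ [(cl, cr)]) (l, r) = front ++ [(cl, max cr r)] := by
        simp only [pvMergeStep, hlastD, hdrop]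
        rw [if_pos ⟨hcli, hc⟩]
      rw [List.foldl_cons, hstep,
        ih front cl (max cr r) (fun q hq => hv q (by simp [hq])) (le_trans hcl (le_max_left _ _))
          (fun q hq => hge q (by simp [hq])) hp]
      have huni : Finset.Icc cl (max cr r) ∪ pvU t
          = Finset.Icc cl cr ∪ pvU ((l, r) :: t) := by
        show _ = Finset.Icc cl cr ∪ (Finset.Icc l r ∪ pvU t)
        rw [← Finset.union_assoc]
        congr 1
        apply Finset.ext
        intro x
        simp only [Finset.mem_union, Finset.mem_Icc]
        omega
      rw [huni]
    · have hstep : pvMergeStep (front ++ [(cl, cr)]) (l, r) = (front ++ [(cl, cr)]) ++ [(l, r)] := by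
        simp only [pvMergeStep, hlastD, hdrop]
        rw [if_neg (by omega)]
      rw [List.foldl_cons, hstep,
        ih (front ++ [(cl, cr)]) l r (fun q hq => hv q (by simp [hq])) hlr hrel hp]
      have hlen : pvLen (front ++ [(cl, cr)]) = pvLen front + (cr - cl + 1) := by
        simp [pvLen]
      have hdisj : Disjoint (Finset.Icc cl cr) (Finset.Icc l r ∪ pvU t) := by
        rw [Finset.disjoint_left]
        intro x hx hx'
        rw [Finset.mem_Icc] at hx
        rcases Finset.mem_union.mp hx' with hx' | hx'
        · rw [Finset.mem_Icc] at hx'; omega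
        · obtain ⟨q, hq, hq1, hq2⟩ := (mem_pvU t x).mp hx'
          have := hrel q hq
          omega
      have hcup : pvU ((l, r) :: t) = Finset.Icc l r ∪ pvU t := rfl
      rw [hcup, Finset.card_union_of_disjoint hdisj, hlen, Int.card_Icc]
      push_cast
      omega

lemma dedup_filter_len {α : Type} [BEq α] [LawfulBEq α] (L : List α) (p : α → Bool) :
    ((PySem.List.dedup L).filter p).length = (PySem.List.dedup (L.filter p)).length := by
  have h1 : ((PySem.List.dedup L).filter p).Nodup := (PySem.List.nodup_dedup L).filter p
  have h2 : (PySem.List.dedup (L.filter p)).Nodup := PySem.List.nodup_dedup _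
  letI : DecidableEq α := fun a b => decidable_of_iff ((a == b) = true) beq_iff_eq
  have hperm := List.perm_of_nodup_nodup_toFinset_eq h1 h2 (by
    ext x
    simp [List.mem_filter])
  exact hperm.length_eq

-- the union length computed by A's merged intervals
lemma a_core (data : List ((Int × Int) × (Int × Int))) (hne : pvI data ≠ []) :
    (match pvMergeIntervals (data.foldl pvStepA []) with
      | none => (0 : Int)
      | some merged => (merged.map (fun p => p.2 - p.1 + 1)).sum)
    = ((pvU (pvI data)).card : Int) := by
  rw [stepA_eq data [], List.nil_append]
  unfold pvMergeIntervals
  cases hS : PySem.List.sorted (pvI data) (fun x => x.1) false with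
  | nil => exact absurd ((PySem.List.sorted_eq_nil_iff _ _ _).mp hS) hne
  | cons f rest =>
    have hperm : (f :: rest).Perm (pvI data) := hS ▸ PySem.List.sorted_perm (pvI data) (fun x => x.1) false
    have hpw : (f :: rest).Pairwise (fun a b => a.1 ≤ b.1) := by
      have := PySem.List.sorted_pairwise (pvI data) (fun x => x.1)
      rwa [hS] at this
    obtain ⟨hrel, hp⟩ := List.pairwise_cons.mp hpw
    have hvmem : ∀ q ∈ f :: rest, q.1 ≤ q.2 := fun q hq => pvI_valid data q (hperm.mem_iff.mp hq)
    have hms := merge_spec rest [] f.1 f.2 (fun q hq => hvmem q (by simp [hq]))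
      (hvmem f (by simp)) hrel hp
    simp only [List.nil_append, pvLen, List.map_nil, List.sum_nil, zero_add] at hms
    show (((rest.foldl pvMergeStep [(f.1, f.2)]).map (fun p => p.2 - p.1 + 1)).sum) = _
    rw [hms]
    congr 1
    exact congrArg Finset.card (pvU_perm hperm)

-- the union length computed by B's sweep
lemma b_core (data : List ((Int × Int) × (Int × Int))) (e0 : Int × Int) (tl : List (Int × Int))
    (hSE : PySem.List.sorted (data.foldl pvStepB []) (fun e => e.1) false = e0 :: tl) :
    ((e0 :: tl).foldl pvSweepStep (0, 0, e0.1)).1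
    = ((pvU (pvI data)).card : Int) := by
  rw [stepB_eq data [], List.nil_append] at hSE
  · have hperm : (e0 :: tl).Perm (pvE data) := hSE ▸ PySem.List.sorted_perm (pvE data) (fun e => e.1) false
    have hpw : (e0 :: tl).Pairwise (fun a b => a.1 ≤ b.1) := by
      have := PySem.List.sorted_pairwise (pvE data) (fun e => e.1)
      rwa [hSE] at this
    obtain ⟨hrel, hp⟩ := List.pairwise_cons.mp hpw
    obtain ⟨hhia, hhib⟩ := le_foldr_max tl e0.1
    have hsum0 : ((e0 :: tl).map (fun e => e.2)).sum = 0 := by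
      rw [List.Perm.sum_eq (hperm.map (fun e => e.2))]
      exact snd_sum_flatMap (pvI data)
    have hsum' : (0 + e0.2) + (tl.map (fun e => e.2)).sum ≤ 0 := by
      simp only [List.map_cons, List.sum_cons] at hsum0
      omega
    have h0 : pvSweepStep (0, 0, e0.1) e0 = (0, 0 + e0.2, e0.1) := by
      simp [pvSweepStep]
    rw [List.foldl_cons, h0,
      sweep_spec tl 0 (0 + e0.2) e0.1 (tl.foldr (fun e m => max e.1 m) e0.1) hp hrel hhib hhia hsum']
    have hvI := pvI_valid data
    have hdep : ∀ x, pvDepthAt ((pvI data).flatMap pvEvts) x = pvDepthAt (e0 :: tl) x :=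
      fun x => pvDepthAt_perm hperm.symm x
    have hdepc : ∀ x, pvDepthAt (e0 :: tl) x = (if e0.1 ≤ x then e0.2 else 0) + pvDepthAt tl x := by
      intro x; simp [pvDepthAt]
    have hset : (Finset.Ico e0.1 (tl.foldr (fun e m => max e.1 m) e0.1)).filter
        (fun x => 0 < (0 + e0.2) + pvDepthAt tl x) = pvU (pvI data) := by
      apply Finset.ext
      intro x
      simp only [Finset.mem_filter, Finset.mem_Ico]
      have hcov := cover_iff (pvI data) hvI x
      constructor
      · rintro ⟨⟨hx1, hx2⟩, hpos⟩
        apply hcov.2.mp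
        rw [hdep x, hdepc x, if_pos hx1]
        omega
      · intro hx
        obtain ⟨q, hq, hq1, hq2⟩ := (mem_pvU _ x).mp hx
        have hpos := hcov.2.mpr hx
        have hq1mem : ((q.1, (1 : Int))) ∈ pvE data := by
          simp only [pvE, List.mem_flatMap]
          exact ⟨q, hq, by simp [pvEvts]⟩
        have hq2mem : ((q.2 + 1, (-1 : Int))) ∈ pvE data := by
          simp only [pvE, List.mem_flatMap]
          exact ⟨q, hq, by simp [pvEvts]⟩
        have h1 : e0.1 ≤ q.1 :=
          PySem.List.key_head_sorted_le (pvE data) (fun e => e.1) hSE (q.1, 1) hq1mem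
        have h2 : q.2 + 1 ≤ tl.foldr (fun e m => max e.1 m) e0.1 := by
          have hmemSE : ((q.2 + 1, (-1 : Int))) ∈ e0 :: tl := by
            rw [← hSE]
            exact (PySem.List.mem_sorted _ _ _ _).mpr hq2mem
          rcases List.mem_cons.mp hmemSE with he | htl
          · have : e0.1 = q.2 + 1 := by rw [← he]
            omega
          · exact hhib _ htl
        refine ⟨⟨le_trans h1 hq1, by omega⟩, ?_⟩
        rw [hdep x, hdepc x, if_pos (le_trans h1 hq1)] at hpos
        omega
    rw [hset]
    ring

-- A counts row-y sensors/beacons by filtering the dedup'd list, B dedups the filtered list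
lemma counts_eq {α : Type} [BEq α] [LawfulBEq α] (L : List α) (p : α → Bool) :
    ((PySem.Set.ofList L).filter p).length = (PySem.Set.ofList (L.filter p)).length := by
  rw [← PySem.List.dedup_eq_ofList, ← PySem.List.dedup_eq_ofList]
  exact dedup_filter_len L p

lemma pre_ne (data : List ((Int × Int) × (Int × Int))) (hPre : Pre_part1 data) :
    pvI data ≠ [] := by
  obtain ⟨p, hp, hle⟩ := hPre
  have hmem : p ∈ data.filter pvCond := List.mem_filter.mpr ⟨hp, by simpa [pvCond] using hle⟩
  simp only [pvI, ne_eq, List.map_eq_nil_iff]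
  intro h
  rw [h] at hmem
  exact absurd hmem (List.not_mem_nil)

-- ===== VERDICT (by name: the statement is the Claim_ definition above) =====
theorem part1_spec : Claim_equal_part1 := by
  intro data _ hPre
  unfold Spec_part1
  have hne := pre_ne data hPre
  have hA := a_core data hne
  have hEne : pvE data ≠ [] := by
    cases hI : pvI data with
    | nil => exact absurd hI hne
    | cons q t => simp [pvE, hI, pvEvts]
  have hEne' : data.foldl pvStepB [] ≠ [] := by
    rw [stepB_eq data [], List.nil_append]; exact hEne
  have hm1 : (data.filter (fun p => decide (p.1.2 = 2000000))).map (fun p => p.1)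
      = (data.map (fun p => p.1)).filter (fun s => decide (s.2 = 2000000)) := by
    rw [List.filter_map]; rfl
  have hm2 : (data.filter (fun p => decide (p.2.2 = 2000000))).map (fun p => p.2)
      = (data.map (fun p => p.2)).filter (fun b => decide (b.2 = 2000000)) := by
    rw [List.filter_map]; rfl
  cases hmm : pvMergeIntervals (data.foldl pvStepA []) with
  | none =>
    exfalso
    rw [stepA_eq data [], List.nil_append] at hmm
    unfold pvMergeIntervals at hmm
    cases hs : PySem.List.sorted (pvI data) (fun x => x.1) false with
    | nil => exact hne (by rwa [PySem.List.sorted_eq_nil_iff] at hs)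
    | cons f rest => rw [hs] at hmm; simp at hmm
  | some m =>
    rw [hmm] at hA
    cases hSE : PySem.List.sorted (data.foldl pvStepB []) (fun e => e.1) false with
    | nil =>
      exact absurd ((PySem.List.sorted_eq_nil_iff _ _ _).mp hSE) hEne'
    | cons e0 tl =>
      have hB := b_core data e0 tl hSE
      simp only [part1, part1_alt, hmm, hSE, hA, hB, hm1, hm2]
      rw [counts_eq (data.map (fun p => p.1)) (fun s => decide (s.2 = 2000000)),
        counts_eq (data.map (fun p => p.2)) (fun b => decide (b.2 = 2000000))]
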